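-- pv_equiv track=rewrite | github.com/huunguyen-hub/simple-shop | spa/utils.py | check_exist_in_dict
-- ===== SOURCE A (Python) =====
-- def isSubArray(list_of_parent, list_of_child):
--     (n, m) = (len(list_of_parent), len(list_of_child))
--     # Two pointers to traverse the arrays
--     (i, j) = (0, 0)
--     # Traverse both arrays simultaneously
--     while i < n and j < m:
--         # If element matches
--         # increment both pointers
--         if list_of_parent[i] == list_of_child[j]:
--             i += 1
--             j += 1
--             # If array B is completely
--             # traversed
--             if j == m:
--                 return True
--             # If not,
--         # increment i and reset j
--         else:
--             i = i - j + 1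
--             j = 0
--     return False
--
-- def check_exist_in_dict(my_list, my_dict):
--     rs = False
--     if not isinstance(my_list, list) or not isinstance(my_dict, dict) or not my_list:
--         return rs
--     my_list.sort()
--     for key in my_dict:
--         same_list = my_dict.get(key)
--         if isinstance(same_list, list) and len(same_list) > 0:
--             same_list.sort()
--             if my_list == same_list:
--                 rs = True
--                 break
--             if isSubArray(same_list, my_list) or isSubArray(my_list, same_list):
--                 rs = True
--                 break
--     return rs
-- ===== SOURCE B (Python) =====
-- # B: declarative sliding-window slice comparison instead of A's two-pointer backtracking scan;
-- # only the shorter list is searched in the longer (equality and both isSubArray directions collapse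
-- # into one window test). Equivalence is about the return value: A sorts my_list and the dict's
-- # lists in place, B leaves its arguments unmodified.
-- def check_exist_in_dict(my_list, my_dict):
--     if not isinstance(my_list, list) or not isinstance(my_dict, dict) or not my_list:
--         return False
--     target = sorted(my_list)
--     for key in my_dict:
--         value = my_dict[key]
--         if isinstance(value, list) and value:
--             v = sorted(value)
--             a, b = (v, target) if len(target) <= len(v) else (target, v)
--             m = len(b)
--             if any(a[i:i + m] == b for i in range(len(a) - m + 1)):
--                 return True
--     return False
-- ===== Notes on version B (the rewrite author's own statement) =====
-- stated objective: simpler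
-- what changed: A runs a hand-written two-pointer backtracking subarray scan in both directions plus a separate equality fast path; B sorts once, orients each pair so only the shorter sorted list is searched in the longer, and tests containment with one declarative any() over slice-window comparisons (equality and both directions collapse into that single test).
import Mathlib
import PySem

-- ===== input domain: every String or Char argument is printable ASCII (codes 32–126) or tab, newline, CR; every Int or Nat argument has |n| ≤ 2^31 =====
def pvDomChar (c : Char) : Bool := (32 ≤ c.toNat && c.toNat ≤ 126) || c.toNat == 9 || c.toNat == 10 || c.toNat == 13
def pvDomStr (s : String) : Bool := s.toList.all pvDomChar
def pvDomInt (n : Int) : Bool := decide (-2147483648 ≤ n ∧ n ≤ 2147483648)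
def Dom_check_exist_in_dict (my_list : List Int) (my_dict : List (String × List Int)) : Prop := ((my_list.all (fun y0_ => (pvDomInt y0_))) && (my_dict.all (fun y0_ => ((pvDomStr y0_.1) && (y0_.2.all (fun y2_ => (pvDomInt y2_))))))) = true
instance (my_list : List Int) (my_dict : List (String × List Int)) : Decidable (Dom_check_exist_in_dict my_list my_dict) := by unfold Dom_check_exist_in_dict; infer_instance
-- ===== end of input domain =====

-- ===== PORT A =====
-- Port of A. Equivalence is about the return value: Python A sorts my_list and the dict's
-- lists in place (a side effect the ports do not model).
-- isSubArray's while-loop: i, j stay nonnegative (i ≥ j throughout), so Nat indices are exact;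
-- list_of_parent[i] / list_of_child[j] are guarded by i < n ∧ j < m, so getD is exact there.
def isSubArrayGo (p c : List Int) (i j : Nat) : Bool :=
  if h : i < p.length ∧ j < c.length then
    if p.getD i 0 == c.getD j 0 then
      if j + 1 == c.length then true
      else isSubArrayGo p c (i + 1) (j + 1)
    else isSubArrayGo p c (i - j + 1) 0
  else false
termination_by (p.length - (i - j), c.length - j)
decreasing_by
  · simp only [Prod.lex_iff]; omega
  · simp only [Prod.lex_iff]; omega

def isSubArray (p c : List Int) : Bool := isSubArrayGo p c 0 0

-- 'for key in my_dict' with early break; my_dict.get(key) is the dict lookup (first match).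
def checkLoopA (my_list : List Int) (d : PySem.Dict String (List Int)) : List String → Bool
  | [] => false
  | k :: ks =>
    match d.get? k with
    | some same_list =>
      if same_list.length > 0 then
        let s := PySem.List.sorted same_list (fun x => x) false
        if my_list == s then true
        else if isSubArray s my_list || isSubArray my_list s then true
        else checkLoopA my_list d ks
      else checkLoopA my_list d ks
    | none => checkLoopA my_list d ks

def check_exist_in_dict (my_list : List Int) (my_dict : List (String × List Int)) : Bool :=
  -- the isinstance checks are always true for the typed arguments; 'not my_list' is emptiness
  if my_list.isEmpty then false
  else
    checkLoopA (PySem.List.sorted my_list (fun x => x) false)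
      (PySem.Dict.mk my_dict) (my_dict.map Prod.fst)

-- ===== PORT B =====
-- any(a[i:i+m] == b for i in range(len(a) - m + 1)); callers guarantee m ≤ len(a),
-- so the Nat subtraction matches Python's range bound.
def isSliceB (a b : List Int) : Bool :=
  let m := b.length
  (List.range (a.length - m + 1)).any
    (fun i => PySem.List.slice a (some (i : Int)) (some ((i : Int) + (m : Int))) == b)

def checkLoopB (target : List Int) (d : PySem.Dict String (List Int)) : List String → Bool
  | [] => false
  | k :: ks =>
    match d.get? k with
    | some value =>
      if value.isEmpty then checkLoopB target d ks
      else
        let v := PySem.List.sorted value (fun x => x) false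
        let ab := if target.length ≤ v.length then (v, target) else (target, v)
        if isSliceB ab.1 ab.2 then true else checkLoopB target d ks
    | none => checkLoopB target d ks

def check_exist_in_dict_alt (my_list : List Int) (my_dict : List (String × List Int)) : Bool :=
  if my_list.isEmpty then false
  else
    checkLoopB (PySem.List.sorted my_list (fun x => x) false)
      (PySem.Dict.mk my_dict) (my_dict.map Prod.fst)

-- ===== PRECONDITION & SPEC =====
def Spec_check_exist_in_dict (my_list : List Int) (my_dict : List (String × List Int)) (out : Bool) : Prop := out = check_exist_in_dict_alt my_list my_dict
instance (my_list : List Int) (my_dict : List (String × List Int)) (out : Bool) : Decidable (Spec_check_exist_in_dict my_list my_dict out) := by unfold Spec_check_exist_in_dict; infer_instance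

-- ===== CLAIM (what is proved, stated in full; the proofs are below) =====
def Claim_equal_check_exist_in_dict : Prop := ∀ (my_list : List Int) (my_dict : List (String × List Int)), Dom_check_exist_in_dict my_list my_dict → Spec_check_exist_in_dict my_list my_dict (check_exist_in_dict my_list my_dict)

-- ===== LEMMAS AND PROOFS =====

-- 'c occurs as a contiguous slice of p starting at k'
def Win (p c : List Int) (k : Nat) : Prop :=
  k + c.length ≤ p.length ∧ (p.drop k).take c.length = c

theorem getElem?_getD (p : List Int) (i : Nat) (h : i < p.length) : p[i]? = some (p.getD i 0) := by
  rw [List.getElem?_eq_getElem h, List.getD_eq_getElem _ _ h]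

theorem win_getD (p c : List Int) (k t : Nat) (hw : Win p c k) (ht : t < c.length) :
    p.getD (k + t) 0 = c.getD t 0 := by
  obtain ⟨hlen, hw⟩ := hw
  conv_rhs => rw [← hw]
  rw [List.getD_eq_getElem?_getD, List.getD_eq_getElem?_getD]
  rw [List.getElem?_take_of_lt ht, List.getElem?_drop]

theorem win_extend (p c : List Int) (s j : Nat) (hp : s + j < p.length) (hc : j < c.length)
    (hpm : (p.drop s).take j = c.take j) (hel : p.getD (s + j) 0 = c.getD j 0) :
    (p.drop s).take (j + 1) = c.take (j + 1) := by
  rw [List.take_add_one, List.take_add_one, hpm]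
  congr 1
  rw [List.getElem?_drop, getElem?_getD p _ (by omega), getElem?_getD c _ hc, hel]

-- invariant of A's two-pointer loop: at state (i, j) the first j characters of c match p at
-- start i - j, and the loop succeeds iff some window at or after that start matches
theorem isSubArrayGo_iff (p c : List Int) (i j : Nat) (hj : j < c.length) (hji : j ≤ i)
    (hpm : (p.drop (i - j)).take j = c.take j) :
    isSubArrayGo p c i j = true ↔ ∃ k, i - j ≤ k ∧ Win p c k := by
  induction i, j using isSubArrayGo.induct p c with
  | case1 i j h heq hdone =>
    rw [isSubArrayGo, dif_pos h, if_pos heq, if_pos hdone]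
    have hlen : j + 1 = c.length := by simpa using hdone
    have hel : p.getD (i - j + j) 0 = c.getD j 0 := by
      have hij : i - j + j = i := by omega
      rw [hij]; simpa using heq
    refine ⟨fun _ => ⟨i - j, le_refl _, by omega, ?_⟩, fun _ => rfl⟩
    have := win_extend p c (i - j) j (by omega) hj hpm hel
    rw [← hlen, this, hlen, List.take_length]
  | case2 i j h heq hdone ih =>
    rw [isSubArrayGo, dif_pos h, if_pos heq, if_neg hdone]
    have hne : j + 1 ≠ c.length := by simpa using hdone
    have h1 : i + 1 - (j + 1) = i - j := by omega
    rw [h1] at ih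
    have hel : p.getD (i - j + j) 0 = c.getD j 0 := by
      have hij : i - j + j = i := by omega
      rw [hij]; simpa using heq
    exact ih (by omega) (by omega) (win_extend p c (i - j) j (by omega) hj hpm hel)
  | case3 i j h heq ih =>
    rw [isSubArrayGo, dif_pos h, if_neg heq]
    simp only [Nat.sub_zero, List.take_zero] at ih
    rw [ih (by omega) (by omega) trivial]
    constructor
    · rintro ⟨k, hk, hw⟩; exact ⟨k, by omega, hw⟩
    · rintro ⟨k, hk, hw⟩
      refine ⟨k, ?_, hw⟩
      rcases Nat.eq_or_lt_of_le hk with hke | hkl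
      · exfalso
        have := win_getD p c k j hw hj
        rw [← hke] at this
        have hij : i - j + j = i := by omega
        rw [hij] at this
        exact heq (by simpa using this)
      · omega
  | case4 i j h =>
    rw [isSubArrayGo, dif_neg h]
    simp only [Bool.false_eq_true, false_iff]
    rintro ⟨k, hk, hw1, hw2⟩
    have hip : p.length ≤ i := by omega
    omega

theorem isSubArray_iff (p c : List Int) (hc : c ≠ []) :
    isSubArray p c = true ↔ ∃ k, Win p c k := by
  have h0 : 0 < c.length := List.length_pos_iff.mpr hc
  rw [isSubArray, isSubArrayGo_iff p c 0 0 h0 (le_refl 0) (by simp)]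
  simp

theorem isSliceB_iff (a b : List Int) : isSliceB a b = true ↔ ∃ k, Win a b k := by
  unfold isSliceB Win
  simp only [List.any_eq_true, List.mem_range, beq_iff_eq, PySem.List.slice_natCast_add]
  constructor
  · rintro ⟨i, hi, heq⟩
    refine ⟨i, ?_, heq⟩
    have hl := congrArg List.length heq
    simp only [List.length_take, List.length_drop] at hl
    omega
  · rintro ⟨k, hk, hw⟩
    exact ⟨k, by omega, hw⟩

-- A's per-value test (equality, then both isSubArray directions) equals B's single
-- oriented window test
theorem value_eq (s t : List Int) (hs : s ≠ []) (ht : t ≠ []) :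
    ((t == s) || (isSubArray s t || isSubArray t s))
      = (if t.length ≤ s.length then isSliceB s t else isSliceB t s) := by
  have hwin_self : ∀ u : List Int, Win u u 0 := by
    intro u; exact ⟨by omega, by simp⟩
  by_cases hle : t.length ≤ s.length
  · rw [if_pos hle, Bool.eq_iff_iff]
    simp only [Bool.or_eq_true, beq_iff_eq, isSubArray_iff s t ht, isSubArray_iff t s hs,
      isSliceB_iff]
    constructor
    · rintro (rfl | h | ⟨k, hk1, hk2⟩)
      · exact ⟨0, hwin_self t⟩
      · exact h
      · have hk0 : k = 0 := by omega
        subst hk0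
        have hlen : s.length = t.length := by omega
        have : t = s := by
          rw [List.drop_zero] at hk2
          rw [← hk2, hlen, List.take_length]
        subst this
        exact ⟨0, hwin_self t⟩
    · intro h; exact Or.inr (Or.inl h)
  · rw [if_neg hle, Bool.eq_iff_iff]
    simp only [Bool.or_eq_true, beq_iff_eq, isSubArray_iff s t ht, isSubArray_iff t s hs,
      isSliceB_iff]
    constructor
    · rintro (rfl | ⟨k, hk1, hk2⟩ | h)
      · omega
      · exfalso; omega
      · exact h
    · intro h; exact Or.inr (Or.inr h)

theorem loop_eq (t : List Int) (d : PySem.Dict String (List Int)) (ht : t ≠ []) (ks : List String) :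
    checkLoopA t d ks = checkLoopB t d ks := by
  induction ks with
  | nil => rfl
  | cons k ks ih =>
    rw [checkLoopA, checkLoopB]
    cases hg : d.get? k with
    | none => exact ih
    | some value =>
      dsimp only
      by_cases hv : value.isEmpty
      · have hlen : ¬ value.length > 0 := by
          rw [List.isEmpty_iff] at hv; simp [hv]
        rw [if_neg hlen, if_pos hv]
        exact ih
      · have hlen : value.length > 0 := by
          simp only [List.isEmpty_iff] at hv
          exact List.length_pos_iff.mpr hv
        rw [if_neg hv, if_pos hlen]
        set s := PySem.List.sorted value (fun x => x) false with hsdef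
        have hsne : s ≠ [] := by
          rw [hsdef, Ne, PySem.List.sorted_eq_nil_iff]
          intro h; rw [h] at hlen; simp at hlen
        have hv2 := value_eq s t hsne ht
        by_cases hcl : t.length ≤ s.length
        · rw [if_pos hcl] at hv2
          simp only [if_pos hcl]
          rw [← hv2]
          cases hC : (t == s) <;> cases hX : (isSubArray s t || isSubArray t s) <;>
            simp only [hC, hX, Bool.false_or, Bool.true_or, Bool.or_false, Bool.or_true,
              Bool.false_eq_true, if_true, if_false, ih]
        · rw [if_neg hcl] at hv2
          simp only [if_neg hcl]
          rw [← hv2]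
          cases hC : (t == s) <;> cases hX : (isSubArray s t || isSubArray t s) <;>
            simp only [hC, hX, Bool.false_or, Bool.true_or, Bool.or_false, Bool.or_true,
              Bool.false_eq_true, if_true, if_false, ih]

-- ===== VERDICT (by name: the statement is the Claim_ definition above) =====
theorem check_exist_in_dict_spec : Claim_equal_check_exist_in_dict := by
  intro my_list my_dict _
  unfold Spec_check_exist_in_dict check_exist_in_dict check_exist_in_dict_alt
  by_cases h : my_list.isEmpty
  · rw [if_pos h, if_pos h]
  · rw [if_neg h, if_neg h]
    apply loop_eq
    rw [Ne, PySem.List.sorted_eq_nil_iff]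
    simp only [List.isEmpty_iff] at h
    exact h
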